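-- pv_equiv track=rewrite | github.com/Unstructured-IO/unstructured | unstructured/partition/text.py | _combine_paragraphs_less_than_min
-- ===== SOURCE A (Python) =====
-- from typing import IO, Any, Callable, List, Optional, Tuple
--
-- def _combine_paragraphs_less_than_min(
--     split_paragraphs: List[str],
--     max_partition: Optional[int] = 1500,
--     min_partition: Optional[int] = 0,
-- ) -> List[str]:
--     """Combine paragraphs less than `min_partition` while not exceeding `max_partition`."""
--     min_partition = min_partition or 0
--     max_possible_partition = len(" ".join(split_paragraphs))
--     max_partition = max_partition or max_possible_partition
--
--     combined_paras: List[str] = []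
--     combined_idxs: List[int] = []
--     for i, para in enumerate(split_paragraphs):
--         if i in combined_idxs:
--             continue
--         # Paragraphs have already been split to fit `max_partition`, so they can be safely added
--         # to the final list of chunks if they are also greater than `min_partition`
--         if len(para) >= min_partition:
--             combined_paras.append(para)
--         else:
--             combined_para = para
--             for j, next_para in enumerate(split_paragraphs[i + 1 :]):  # noqa
--                 # Combine the current paragraph(s), e.g. `combined_para` with the next paragraph(s)
--                 # as long as they don't exceed `max_partition`, and keep track of the indices
--                 # that have been combined.
--                 if len(combined_para) + len(next_para) + 1 <= max_partition:
--                     combined_idxs.append(i + j + 1)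
--                     combined_para += " " + next_para
--                 else:
--                     break
--             combined_paras.append(combined_para)
--
--     return combined_paras
-- ===== SOURCE B (Python) =====
-- from typing import List, Optional
--
--
-- def _combine_paragraphs_less_than_min(
--     split_paragraphs: List[str],
--     max_partition: Optional[int] = 1500,
--     min_partition: Optional[int] = 0,
-- ) -> List[str]:
--     """Single forward pass: keep an open accumulator instead of a skip-list + inner loop."""
--     min_partition = min_partition or 0
--     max_partition = max_partition or len(" ".join(split_paragraphs))
--
--     out: List[str] = []
--     current: Optional[str] = None
--     for para in split_paragraphs:
--         if current is not None:
--             if len(current) + len(para) + 1 <= max_partition: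
--                 current += " " + para
--                 continue
--             out.append(current)
--             current = None
--         if len(para) >= min_partition:
--             out.append(para)
--         else:
--             current = para
--     if current is not None:
--         out.append(current)
--     return out
-- ===== Notes on version B (the rewrite author's own statement) =====
-- stated objective: faster
-- what changed: Replaces A's outer loop plus combined_idxs skip-list plus inner absorbing loop by a single forward pass keeping one open accumulator string (or None), flushing it when the next paragraph does not fit; the per-index skip-list membership scan disappears.
import Mathlib
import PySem

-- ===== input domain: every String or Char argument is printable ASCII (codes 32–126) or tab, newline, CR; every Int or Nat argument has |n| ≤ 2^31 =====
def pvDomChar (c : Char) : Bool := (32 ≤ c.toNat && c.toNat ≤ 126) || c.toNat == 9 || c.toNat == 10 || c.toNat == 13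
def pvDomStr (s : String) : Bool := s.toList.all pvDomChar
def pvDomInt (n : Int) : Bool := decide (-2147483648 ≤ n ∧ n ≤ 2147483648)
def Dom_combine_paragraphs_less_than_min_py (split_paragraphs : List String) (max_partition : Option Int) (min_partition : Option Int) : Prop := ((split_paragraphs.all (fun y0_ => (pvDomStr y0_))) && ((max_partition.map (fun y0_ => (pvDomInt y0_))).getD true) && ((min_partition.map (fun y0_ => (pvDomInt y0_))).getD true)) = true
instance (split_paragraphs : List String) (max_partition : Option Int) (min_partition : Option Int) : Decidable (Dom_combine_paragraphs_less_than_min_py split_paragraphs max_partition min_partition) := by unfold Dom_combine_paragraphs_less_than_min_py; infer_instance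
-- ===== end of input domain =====

-- B replaces A's outer loop + combined_idxs skip-list + inner absorbing loop by one forward
-- pass with an open accumulator (objective: simpler); same return value, no side effects.

-- ===== PORT A =====
-- `x or y` on ints: x if x is truthy (≠ 0) else y
def pyOrInt (x : Option Int) (y : Int) : Int :=
  match x with
  | none => y
  | some v => if v = 0 then y else v

-- inner loop: `for j, next_para in enumerate(split_paragraphs[i+1:])` — the list argument
-- `rest` is exactly the slice split_paragraphs[i+1:] at the call site; j counts from 0.
def innerA (maxp : Int) (i : Int) : List String → Int → List Int → String → List Int × String
  | [], _, idxs, cp => (idxs, cp)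
  | next :: t, j, idxs, cp =>
    if PySem.Str.len cp + PySem.Str.len next + 1 ≤ maxp then
      innerA maxp i t (j + 1) (idxs ++ [i + j + 1]) (cp ++ " " ++ next)
    else (idxs, cp)

-- outer loop: `for i, para in enumerate(split_paragraphs)` with the skip-list check
def outerA (minp maxp : Int) : Int → List String → List String → List Int → List String
  | _, [], paras, _ => paras
  | i, para :: rest, paras, idxs =>
    if i ∈ idxs then outerA minp maxp (i + 1) rest paras idxs
    else if minp ≤ PySem.Str.len para then outerA minp maxp (i + 1) rest (paras ++ [para]) idxs
    else
      let r := innerA maxp i rest 0 idxs para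
      outerA minp maxp (i + 1) rest (paras ++ [r.2]) r.1

def combine_paragraphs_less_than_min_py (split_paragraphs : List String) (max_partition : Option Int) (min_partition : Option Int) : List String :=
  let minp := pyOrInt min_partition 0
  let max_possible_partition := PySem.Str.len (PySem.Str.join " " split_paragraphs)
  let maxp := pyOrInt max_partition max_possible_partition
  outerA minp maxp 0 split_paragraphs [] []

-- ===== PORT B =====
-- one forward pass; `cur` is the open group (None = no group open)
def bLoop (minp maxp : Int) : List String → Option String → List String
  | [], none => []
  | [], some c => [c]
  | para :: rest, none =>
    if minp ≤ PySem.Str.len para then para :: bLoop minp maxp rest none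
    else bLoop minp maxp rest (some para)
  | para :: rest, some c =>
    if PySem.Str.len c + PySem.Str.len para + 1 ≤ maxp then
      bLoop minp maxp rest (some (c ++ " " ++ para))
    else
      c :: (if minp ≤ PySem.Str.len para then para :: bLoop minp maxp rest none
            else bLoop minp maxp rest (some para))

def combine_paragraphs_less_than_min_py_alt (split_paragraphs : List String) (max_partition : Option Int) (min_partition : Option Int) : List String :=
  let minp := pyOrInt min_partition 0
  let maxp := pyOrInt max_partition (PySem.Str.len (PySem.Str.join " " split_paragraphs))
  bLoop minp maxp split_paragraphs none

-- ===== PRECONDITION & SPEC =====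
def Spec_combine_paragraphs_less_than_min_py (split_paragraphs : List String) (max_partition : Option Int) (min_partition : Option Int) (out : List String) : Prop := out = combine_paragraphs_less_than_min_py_alt split_paragraphs max_partition min_partition
instance (split_paragraphs : List String) (max_partition : Option Int) (min_partition : Option Int) (out : List String) : Decidable (Spec_combine_paragraphs_less_than_min_py split_paragraphs max_partition min_partition out) := by unfold Spec_combine_paragraphs_less_than_min_py; infer_instance

-- ===== CLAIM (what is proved, stated in full; the proofs are below) =====
def Claim_equal_combine_paragraphs_less_than_min_py : Prop := ∀ (split_paragraphs : List String) (max_partition : Option Int) (min_partition : Option Int), Dom_combine_paragraphs_less_than_min_py split_paragraphs max_partition min_partition → Spec_combine_paragraphs_less_than_min_py split_paragraphs max_partition min_partition (combine_paragraphs_less_than_min_py split_paragraphs max_partition min_partition)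

-- ===== LEMMAS AND PROOFS =====

-- the inner loop only appends to the skip-list
theorem innerA_mem (maxp i : Int) (rest : List String) (j : Int) (idxs : List Int) (cp : String)
    {x : Int} (hx : x ∈ idxs) : x ∈ (innerA maxp i rest j idxs cp).1 := by
  induction rest generalizing j idxs cp with
  | nil => simpa [innerA] using hx
  | cons next t ih =>
    simp only [innerA]
    split
    · exact ih _ _ _ (by simp [hx])
    · simpa using hx

-- shifting the base index: indices produced are i + j + 1, so (i, j+1) ≡ (i+1, j)
theorem innerA_shift (maxp i : Int) (rest : List String) (j : Int) (idxs : List Int) (cp : String) :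
    innerA maxp i rest (j + 1) idxs cp = innerA maxp (i + 1) rest j idxs cp := by
  induction rest generalizing j idxs cp with
  | nil => rfl
  | cons next t ih =>
    simp only [innerA]
    split
    · rw [ih]; ring_nf
    · rfl

-- joint invariant: with no pending skip-index ≥ i (resp. ≥ i+1), A's outer loop from i
-- equals B's pass with no open group (resp. after A's inner absorption, with group cp open)
theorem main_inv (minp maxp : Int) (rest : List String) :
    (∀ (i : Int) (idxs : List Int) (paras : List String), (∀ x ∈ idxs, x < i) →
      outerA minp maxp i rest paras idxs = paras ++ bLoop minp maxp rest none) ∧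
    (∀ (i : Int) (idxs : List Int) (paras : List String) (cp : String), (∀ x ∈ idxs, x < i + 1) →
      outerA minp maxp (i + 1) rest (paras ++ [(innerA maxp i rest 0 idxs cp).2])
          (innerA maxp i rest 0 idxs cp).1
        = paras ++ bLoop minp maxp rest (some cp)) := by
  induction rest with
  | nil =>
    refine ⟨fun i idxs paras _ => by simp [outerA, bLoop], fun i idxs paras cp _ => by simp [outerA, innerA, bLoop]⟩
  | cons next t ih =>
    obtain ⟨ihn, ihs⟩ := ih
    constructor
    · intro i idxs paras h
      have hni : i ∉ idxs := fun hmem => absurd (h i hmem) (lt_irrefl i)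
      simp only [outerA, if_neg hni, bLoop]
      by_cases hmin : minp ≤ PySem.Str.len next
      · rw [if_pos hmin, if_pos hmin, ihn (i + 1) idxs (paras ++ [next]) (fun x hx => by have := h x hx; omega)]
        simp
      · rw [if_neg hmin, if_neg hmin]
        exact ihs i idxs paras next (fun x hx => by have := h x hx; omega)
    · intro i idxs paras cp h
      simp only [innerA, bLoop]
      by_cases hfit : PySem.Str.len cp + PySem.Str.len next + 1 ≤ maxp
      · rw [if_pos hfit, if_pos hfit]
        have hz : i + 0 + 1 = i + 1 := by ring
        rw [hz, innerA_shift]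
        have hmem : (i + 1) ∈ (innerA maxp (i + 1) t 0 (idxs ++ [i + 1]) (cp ++ " " ++ next)).1 :=
          innerA_mem _ _ _ _ _ _ (by simp)
        have := ihs (i + 1) (idxs ++ [i + 1]) paras (cp ++ " " ++ next)
          (fun x hx => by rcases List.mem_append.1 hx with h1 | h1
                          · have := h x h1; omega
                          · simp at h1; omega)
        simp only [outerA, if_pos hmem] at *
        exact this
      · rw [if_neg hfit, if_neg hfit]
        have hni : (i + 1) ∉ idxs := fun hmem => absurd (h _ hmem) (lt_irrefl _)
        simp only [outerA, if_neg hni]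
        by_cases hmin : minp ≤ PySem.Str.len next
        · rw [if_pos hmin, if_pos hmin,
            ihn (i + 1 + 1) idxs (paras ++ [cp] ++ [next]) (fun x hx => by have := h x hx; omega)]
          simp
        · rw [if_neg hmin, if_neg hmin]
          have := ihs (i + 1) idxs (paras ++ [cp]) next (fun x hx => by have := h x hx; omega)
          simpa using this

-- ===== VERDICT (by name: the statement is the Claim_ definition above) =====
theorem combine_paragraphs_less_than_min_py_spec : Claim_equal_combine_paragraphs_less_than_min_py := by
  intro sp mx mn _
  unfold Spec_combine_paragraphs_less_than_min_py
  unfold combine_paragraphs_less_than_min_py combine_paragraphs_less_than_min_py_alt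
  exact (main_inv _ _ sp).1 0 [] [] (by simp)
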